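-- pv_equiv track=rewrite | github.com/OCTOPAILTD/octopai.localai | src/validator/repair.py | _find_where_range
-- ===== SOURCE A (Python) =====
-- from typing import Optional, Tuple
--
-- _CLAUSE_MARKERS = (
--     " GROUP BY ",
--     " HAVING ",
--     " ORDER BY ",
--     " UNION ",
--     " INTERSECT ",
--     " EXCEPT ",
--     " LIMIT ",
-- )
--
-- def _is_token_at(text: str, idx: int, token: str) -> bool:
--     end = idx + len(token)
--     if end > len(text):
--         return False
--     if text[idx:end] != token:
--         return False
--     prev = text[idx - 1] if idx > 0 else " "
--     nxt = text[end] if end < len(text) else " "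
--     return (not (prev.isalnum() or prev == "_")) and (not (nxt.isalnum() or nxt == "_"))
--
-- def _find_where_range(statement: str) -> Optional[Tuple[int, int]]:
--     upper = statement.upper()
--     in_single = False
--     in_double = False
--     depth = 0
--
--     where_start = -1
--     where_depth = 0
--     i = 0
--     while i < len(statement):
--         ch = statement[i]
--         if ch == "'" and not in_double:
--             in_single = not in_single
--         elif ch == '"' and not in_single:
--             in_double = not in_double
--         elif not in_single and not in_double:
--             if ch == "(":
--                 depth += 1
--             elif ch == ")":
--                 depth = max(0, depth - 1)
--             elif _is_token_at(upper, i, "WHERE"):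
--                 where_start = i
--                 where_depth = depth
--                 break
--         i += 1
--
--     if where_start < 0:
--         return None
--
--     where_end = len(statement)
--     j = where_start + 7
--     while j < len(statement):
--         ch = statement[j]
--         if ch == "'" and not in_double:
--             in_single = not in_single
--         elif ch == '"' and not in_single:
--             in_double = not in_double
--         elif not in_single and not in_double:
--             if ch == "(":
--                 depth += 1
--             elif ch == ")":
--                 depth = max(0, depth - 1)
--             else:
--                 if depth < where_depth:
--                     return where_start, j
--                 for marker in _CLAUSE_MARKERS:
--                     if depth == where_depth and upper.startswith(marker, j):
--                         where_end = j
--                         return where_start, where_end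
--         j += 1
--
--     return where_start, where_end
-- ===== SOURCE B (Python) =====
-- from typing import Optional, Tuple
--
-- _CLAUSE_MARKERS = (
--     " GROUP BY ",
--     " HAVING ",
--     " ORDER BY ",
--     " UNION ",
--     " INTERSECT ",
--     " EXCEPT ",
--     " LIMIT ",
-- )
--
-- def _is_token_at(text: str, idx: int, token: str) -> bool:
--     end = idx + len(token)
--     if end > len(text):
--         return False
--     if text[idx:end] != token:
--         return False
--     prev = text[idx - 1] if idx > 0 else " "
--     nxt = text[end] if end < len(text) else " "
--     return (not (prev.isalnum() or prev == "_")) and (not (nxt.isalnum() or nxt == "_"))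
--
-- def _apply(state, ch):
--     """Update tracker state (in_single, in_double, depth) for one quote/paren char."""
--     s, d, dep = state
--     if ch == "'" and not d:
--         return (not s, d, dep)
--     if ch == '"' and not s:
--         return (s, not d, dep)
--     if not s and not d:
--         if ch == "(":
--             return (s, d, dep + 1)
--         if ch == ")":
--             return (s, d, max(0, dep - 1))
--     return state
--
-- def _first_where(upper, lo, hi):
--     """First word-boundary WHERE occurrence in [lo, hi), else -1."""
--     k = upper.find("WHERE", lo)
--     while 0 <= k < hi:
--         if _is_token_at(upper, k, "WHERE"):
--             return k
--         k = upper.find("WHERE", k + 1)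
--     return -1
--
-- def _find_where_range(statement: str) -> Optional[Tuple[int, int]]:
--     upper = statement.upper()
--     n = len(statement)
--     # The only characters that change tracker state are quotes and parens; collect
--     # their positions once, then work gap by gap between consecutive events.
--     events = [i for i, c in enumerate(statement) if c in "'\"()"]
--
--     # Phase 1: locate the first WHERE keyword outside string literals.
--     state = (False, False, 0)
--     where_start = -1
--     pos = 0
--     for e in events + [n]:
--         if not state[0] and not state[1]:
--             k = _first_where(upper, pos, e)
--             if k >= 0:
--                 where_start = k
--                 break
--         if e < n:
--             state = _apply(state, statement[e])
--             pos = e + 1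
--     if where_start < 0:
--         return None
--     where_depth = state[2]
--
--     # Phase 2: resume the event walk past the keyword and find the clause end.
--     pos = where_start + 7
--     for e in [x for x in events if x >= pos] + [n]:
--         if not state[0] and not state[1]:
--             if state[2] < where_depth:
--                 if pos < e:
--                     return where_start, pos
--             elif state[2] == where_depth:
--                 hits = [k for k in (upper.find(m, pos) for m in _CLAUSE_MARKERS)
--                         if 0 <= k < e]
--                 if hits:
--                     return where_start, min(hits)
--         if e < n:
--             state = _apply(state, statement[e])
--             pos = e + 1
--     return where_start, n
-- ===== Notes on version B (the rewrite author's own statement) =====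
-- stated objective: faster
-- what changed: B replaces A's two character-by-character stateful while-loops with an event-driven scan: the quote/paren positions are collected once, and each event-free gap is searched with str.find for the WHERE keyword and for the clause markers, so the per-character Python loop disappears.
import Mathlib
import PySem

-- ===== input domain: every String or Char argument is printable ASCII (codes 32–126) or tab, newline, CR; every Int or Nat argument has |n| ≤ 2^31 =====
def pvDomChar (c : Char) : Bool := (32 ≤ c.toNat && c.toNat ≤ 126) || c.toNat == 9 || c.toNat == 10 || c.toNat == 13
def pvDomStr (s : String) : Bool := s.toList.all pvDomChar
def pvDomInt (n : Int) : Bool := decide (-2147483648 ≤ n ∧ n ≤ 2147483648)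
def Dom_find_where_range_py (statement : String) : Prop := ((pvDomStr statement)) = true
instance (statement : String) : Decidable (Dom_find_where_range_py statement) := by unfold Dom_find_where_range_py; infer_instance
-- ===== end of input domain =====

-- B replaces A's character-by-character scan with an event-driven scan: the quote/paren
-- positions are collected once and each event-free gap is searched with str.find, removing
-- the per-character Python loop (objective: faster by a constant factor; measured by the check).

-- ===== PORT A =====
-- shared module constants/helpers (identical in Source A and Source B)
def clauseMarkers : List (List Char) :=
  [" GROUP BY ".toList, " HAVING ".toList, " ORDER BY ".toList, " UNION ".toList,
   " INTERSECT ".toList, " EXCEPT ".toList, " LIMIT ".toList]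

def whereTok : List Char := "WHERE".toList

-- _is_token_at; text[idx:end] with 0 ≤ idx ≤ end is (drop idx).take (end-idx) = (drop idx).take token.length
def isTokenAt (text : List Char) (idx : Nat) (token : List Char) : Bool :=
  let endI := idx + token.length
  if endI > text.length then false
  else if ((text.drop idx).take token.length) ≠ token then false
  else
    let prev := if idx > 0 then text.getD (idx - 1) ' ' else ' '
    let nxt := if endI < text.length then text.getD endI ' ' else ' '
    (!(PySem.Chars.isalnum prev || prev == '_')) && (!(PySem.Chars.isalnum nxt || nxt == '_'))

-- first while-loop of A: returns (i, in_single, in_double, depth) at the break, none if no WHERE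
def loopA1 (cs up : List Char) (i : Nat) (s d : Bool) (dep : Int) :
    Option (Nat × Bool × Bool × Int) :=
  if hi : i < cs.length then
    let ch := cs.getD i ' '
    if ch = '\'' ∧ d = false then loopA1 cs up (i+1) (!s) d dep
    else if ch = '"' ∧ s = false then loopA1 cs up (i+1) s (!d) dep
    else if s = false ∧ d = false then
      if ch = '(' then loopA1 cs up (i+1) s d (dep + 1)
      else if ch = ')' then loopA1 cs up (i+1) s d (max 0 (dep - 1))
      else if isTokenAt up i whereTok then some (i, s, d, dep)
      else loopA1 cs up (i+1) s d dep
    else loopA1 cs up (i+1) s d dep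
  else none
termination_by cs.length - i

-- second while-loop of A (upper.startswith(m, j) with 0 ≤ j is m <+: up.drop j)
def loopA2 (cs up : List Char) (j : Nat) (ws : Nat) (wd : Int) (s d : Bool) (dep : Int) :
    Int × Int :=
  if hj : j < cs.length then
    let ch := cs.getD j ' '
    if ch = '\'' ∧ d = false then loopA2 cs up (j+1) ws wd (!s) d dep
    else if ch = '"' ∧ s = false then loopA2 cs up (j+1) ws wd s (!d) dep
    else if s = false ∧ d = false then
      if ch = '(' then loopA2 cs up (j+1) ws wd s d (dep + 1)
      else if ch = ')' then loopA2 cs up (j+1) ws wd s d (max 0 (dep - 1))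
      else if dep < wd then ((ws : Int), (j : Int))
      else if clauseMarkers.any (fun m => decide (dep = wd) && List.isPrefixOf m (up.drop j)) then
        ((ws : Int), (j : Int))
      else loopA2 cs up (j+1) ws wd s d dep
    else loopA2 cs up (j+1) ws wd s d dep
  else ((ws : Int), (cs.length : Int))
termination_by cs.length - j

def find_where_range_py (statement : String) : Option (Int × Int) :=
  let cs := statement.toList
  let up := (PySem.Str.upper statement).toList
  match loopA1 cs up 0 false false 0 with
  | none => none
  | some (ws, s, d, dep) => some (loopA2 cs up (ws + 7) ws dep s d dep)

-- ===== PORT B =====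
-- _apply of Source B: update tracker state (in_single, in_double, depth) for one quote/paren char
def applyEv (st : Bool × Bool × Int) (c : Char) : Bool × Bool × Int :=
  if c = '\'' ∧ st.2.1 = false then (!st.1, st.2.1, st.2.2)
  else if c = '"' ∧ st.1 = false then (st.1, !st.2.1, st.2.2)
  else if st.1 = false ∧ st.2.1 = false then
    if c = '(' then (st.1, st.2.1, st.2.2 + 1)
    else if c = ')' then (st.1, st.2.1, max 0 (st.2.2 - 1))
    else st
  else st

-- hand port of Python str.find(pat, k) for a nonnegative start index k (exact: first
-- index ≥ k where pat occurs as a slice, else -1; k past the end gives -1 for pat ≠ '')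
def findFrom (text pat : List Char) (k : Nat) : Int :=
  if h : k + pat.length ≤ text.length then
    if (text.drop k).take pat.length = pat then (k : Int)
    else findFrom text pat (k + 1)
  else -1
termination_by text.length + 1 - k
decreasing_by omega

-- termination fact cited by firstWhere: findFrom never returns an index below its start
lemma findFrom_ge (text pat : List Char) (k : Nat) :
    findFrom text pat k = -1 ∨ (k : Int) ≤ findFrom text pat k := by
  fun_induction findFrom text pat k with
  | case1 k h hpre => right; simp
  | case2 k h hpre ih =>
    rcases ih with h1 | h1
    · exact Or.inl h1
    · right; omega
  | case3 k h => left; rfl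

-- _first_where of Source B: first word-boundary WHERE occurrence in [lo, hi), else -1
def firstWhere (up : List Char) (lo hi : Nat) : Int :=
  let k := findFrom up whereTok lo
  if hk : 0 ≤ k ∧ k < (hi : Int) then
    if isTokenAt up k.toNat whereTok then k
    else firstWhere up (k.toNat + 1) hi
  else -1
termination_by hi - lo
decreasing_by
  rcases findFrom_ge up whereTok lo with h | h <;> omega

-- the characters that change tracker state
def isSpec (c : Char) : Bool := c == '\'' || c == '"' || c == '(' || c == ')'

-- event positions: [i for i, c in enumerate(statement) if c in "'\"()"]
def eventsOf (cs : List Char) : List Nat :=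
  (List.range cs.length).filter (fun i => isSpec (cs.getD i ' '))

-- phase-1 loop of Source B (over events + [n]): first WHERE outside string literals,
-- returned together with the tracker state at its gap
def phase1 (cs up : List Char) : List Nat → (Bool × Bool × Int) → Nat →
    Option (Nat × (Bool × Bool × Int))
  | [], _, _ => none
  | e :: rest, st, pos =>
    let k := if st.1 = false ∧ st.2.1 = false then firstWhere up pos e else -1
    if 0 ≤ k then some (k.toNat, st)
    else if e < cs.length then phase1 cs up rest (applyEv st (cs.getD e ' ')) (e + 1)
    else phase1 cs up rest st pos

-- phase-2 loop of Source B (over the events past the keyword + [n])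
def phase2 (cs up : List Char) (ws : Nat) (wd : Int) : List Nat → (Bool × Bool × Int) → Nat →
    Int × Int
  | [], _, _ => ((ws : Int), (cs.length : Int))
  | e :: rest, st, pos =>
    let trigger : Option Int :=
      if st.1 = false ∧ st.2.1 = false then
        if st.2.2 < wd then (if pos < e then some (pos : Int) else none)
        else if st.2.2 = wd then
          PySem.List.min? ((clauseMarkers.map (fun m => findFrom up m pos)).filter
            (fun k => decide (0 ≤ k) && decide (k < (e : Int)))) (fun x => x)
        else none
      else none
    match trigger with
    | some j => ((ws : Int), j)
    | none =>
      if e < cs.length then phase2 cs up ws wd rest (applyEv st (cs.getD e ' ')) (e + 1)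
      else phase2 cs up ws wd rest st pos

def find_where_range_py_alt (statement : String) : Option (Int × Int) :=
  let cs := statement.toList
  let up := (PySem.Str.upper statement).toList
  let n := cs.length
  let events := eventsOf cs
  match phase1 cs up (events ++ [n]) (false, false, 0) 0 with
  | none => none
  | some (ws, st) =>
    some (phase2 cs up ws st.2.2 ((events.filter (fun x => ws + 7 ≤ x)) ++ [n]) st (ws + 7))

-- ===== PRECONDITION & SPEC =====
def Spec_find_where_range_py (statement : String) (out : Option (Int × Int)) : Prop := out = find_where_range_py_alt statement
instance (statement : String) (out : Option (Int × Int)) : Decidable (Spec_find_where_range_py statement out) := by unfold Spec_find_where_range_py; infer_instance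

-- ===== CLAIM (what is proved, stated in full; the proofs are below) =====
def Claim_equal_find_where_range_py : Prop := ∀ (statement : String), Dom_find_where_range_py statement → Spec_find_where_range_py statement (find_where_range_py statement)

-- ===== LEMMAS AND PROOFS =====

-- proof-side prefix states
def Fst (cs : List Char) (i : Nat) : Bool × Bool × Int :=
  (cs.take i).foldl applyEv (false, false, 0)

def Gst (cs : List Char) (ws k : Nat) : Bool × Bool × Int :=
  ((cs.drop (ws + 7)).take k).foldl applyEv (Fst cs ws)

-- reference predicate for A's first loop
def pPred (cs up : List Char) (i : Nat) : Bool :=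
  !(Fst cs i).1 && !(Fst cs i).2.1 && isTokenAt up i whereTok

-- reference predicate for A's second loop (index k relative to ws+7)
def qPred (cs up : List Char) (ws : Nat) (wd : Int) (k : Nat) : Bool :=
  let st := Gst cs ws k
  let ch := cs.getD (ws + 7 + k) ' '
  !st.1 && !st.2.1 && !(isSpec ch) &&
  (decide (st.2.2 < wd) ||
    (decide (st.2.2 = wd) && clauseMarkers.any (fun m => List.isPrefixOf m (up.drop (ws + 7 + k)))))

lemma Fst_succ (cs : List Char) (i : Nat) (hi : i < cs.length) :
    Fst cs (i+1) = applyEv (Fst cs i) (cs.getD i ' ') := by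
  unfold Fst
  rw [List.take_add_one, List.getElem?_eq_getElem hi, Option.toList_some, List.foldl_append]
  simp [List.getD, List.getElem?_eq_getElem hi]

lemma Gst_succ (cs : List Char) (ws k : Nat) (hk : ws + 7 + k < cs.length) :
    Gst cs ws (k+1) = applyEv (Gst cs ws k) (cs.getD (ws + 7 + k) ' ') := by
  unfold Gst
  have hd : (cs.drop (ws + 7))[k]? = cs[ws + 7 + k]? := by rw [List.getElem?_drop]
  rw [List.take_add_one, hd, List.getElem?_eq_getElem hk, Option.toList_some, List.foldl_append]
  simp [List.getD, List.getElem?_eq_getElem hk]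

lemma applyEv_plain (st : Bool × Bool × Int) (c : Char) (h : isSpec c = false) :
    applyEv st c = st := by
  simp only [isSpec, Bool.or_eq_false_iff, beq_eq_false_iff_ne, ne_eq] at h
  obtain ⟨⟨⟨h1, h2⟩, h3⟩, h4⟩ := h
  unfold applyEv
  rw [if_neg (by tauto), if_neg (by tauto)]
  split_ifs <;> simp_all

lemma tok_W (up : List Char) (i : Nat) (h : isTokenAt up i whereTok = true) :
    i < up.length ∧ up.getD i ' ' = 'W' := by
  unfold isTokenAt at h
  simp [whereTok] at h
  obtain ⟨hlen, hslice, -⟩ := h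
  refine ⟨by omega, ?_⟩
  have h00 : ((up.drop i).take 5)[0]? = (up.drop i)[0]? :=
    List.getElem?_take_of_lt (by omega)
  rw [hslice] at h00
  have h1 : up[i]? = some 'W' := by
    have hdr : (up.drop i)[0]? = up[i + 0]? := by rw [List.getElem?_drop]
    rw [hdr] at h00; simpa using h00.symm
  simp [List.getD, h1]

lemma upAt (cs : List Char) (i : Nat) (hi : i < cs.length) :
    (cs.map PySem.Chars.upperChar).getD i ' ' = PySem.Chars.upperChar (cs.getD i ' ') := by
  simp [List.getD, List.getElem?_eq_getElem hi, List.getElem?_map]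

lemma find?_congr {α : Type} {p q : α → Bool} :
    ∀ (l : List α), (∀ a ∈ l, p a = q a) → l.find? p = l.find? q := by
  intro l
  induction l with
  | nil => intro _; rfl
  | cons a t ih =>
    intro h
    have ha := h a (by simp)
    rw [List.find?_cons, List.find?_cons, ha]
    cases hqa : q a with
    | true => rfl
    | false => exact ih fun b hb => h b (by simp [hb])

lemma tok_false_of_char (cs : List Char) (i : Nat) (hi : i < cs.length) (c : Char)
    (hc : cs.getD i ' ' = c) (hW : PySem.Chars.upperChar c ≠ 'W') :
    isTokenAt (cs.map PySem.Chars.upperChar) i whereTok = false := by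
  cases h' : isTokenAt (cs.map PySem.Chars.upperChar) i whereTok with
  | false => rfl
  | true =>
    exfalso
    have h2 := (tok_W _ i h').2
    rw [upAt cs i hi, hc] at h2
    exact hW h2

lemma any_const_and {α : Type} (l : List α) (c : Bool) (p : α → Bool) :
    l.any (fun m => c && p m) = (c && l.any p) := by
  cases c <;> simp

lemma loopA1_eq (cs : List Char) :
    ∀ (m i : Nat) (s d : Bool) (dep : Int), cs.length - i = m → Fst cs i = (s, d, dep) →
      loopA1 cs (cs.map PySem.Chars.upperChar) i s d dep
        = ((List.range' i m).find? (pPred cs (cs.map PySem.Chars.upperChar))).map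
            (fun w => (w, Fst cs w)) := by
  intro m
  induction m with
  | zero =>
    intro i s d dep hm hst
    have hi : ¬ i < cs.length := by omega
    rw [loopA1]
    simp [hi]
  | succ m ih =>
    intro i s d dep hm hst
    have hi : i < cs.length := by omega
    have hstep : Fst cs (i+1) = applyEv (s, d, dep) (cs.getD i ' ') := by
      rw [Fst_succ cs i hi, hst]
    rw [loopA1, List.range'_succ, List.find?_cons]
    simp only [dif_pos hi]
    by_cases h1 : cs.getD i ' ' = '\'' ∧ d = false
    · have hpa : pPred cs (cs.map PySem.Chars.upperChar) i = false := by
        unfold pPred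
        rw [hst, tok_false_of_char cs i hi _ h1.1 (by decide)]
        simp
      have hsb : applyEv (s, d, dep) (cs.getD i ' ') = (!s, d, dep) := by
        unfold applyEv; dsimp only; rw [if_pos h1]
      rw [if_pos h1, hpa]
      exact ih (i+1) (!s) d dep (by omega) (by rw [hstep, hsb])
    · rw [if_neg h1]
      by_cases h2 : cs.getD i ' ' = '"' ∧ s = false
      · have hpa : pPred cs (cs.map PySem.Chars.upperChar) i = false := by
          unfold pPred
          rw [hst, tok_false_of_char cs i hi _ h2.1 (by decide)]
          simp
        have hsb : applyEv (s, d, dep) (cs.getD i ' ') = (s, !d, dep) := by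
          unfold applyEv; dsimp only; rw [if_neg h1, if_pos h2]
        rw [if_pos h2, hpa]
        exact ih (i+1) s (!d) dep (by omega) (by rw [hstep, hsb])
      · rw [if_neg h2]
        by_cases h3 : s = false ∧ d = false
        · rw [if_pos h3]
          obtain ⟨hs, hd⟩ := h3
          by_cases h4 : cs.getD i ' ' = '('
          · have hpa : pPred cs (cs.map PySem.Chars.upperChar) i = false := by
              unfold pPred
              rw [hst, tok_false_of_char cs i hi _ h4 (by decide)]
              simp
            have hsb : applyEv (s, d, dep) (cs.getD i ' ') = (s, d, dep + 1) := by
              unfold applyEv; dsimp only; rw [if_neg h1, if_neg h2, if_pos ⟨hs, hd⟩, if_pos h4]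
            rw [if_pos h4, hpa]
            exact ih (i+1) s d (dep + 1) (by omega) (by rw [hstep, hsb])
          · rw [if_neg h4]
            by_cases h5 : cs.getD i ' ' = ')'
            · have hpa : pPred cs (cs.map PySem.Chars.upperChar) i = false := by
                unfold pPred
                rw [hst, tok_false_of_char cs i hi _ h5 (by decide)]
                simp
              have hsb : applyEv (s, d, dep) (cs.getD i ' ') = (s, d, max 0 (dep - 1)) := by
                unfold applyEv; dsimp only
                rw [if_neg h1, if_neg h2, if_pos ⟨hs, hd⟩, if_neg h4, if_pos h5]
              rw [if_pos h5, hpa]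
              exact ih (i+1) s d (max 0 (dep - 1)) (by omega) (by rw [hstep, hsb])
            · rw [if_neg h5]
              by_cases h6 : isTokenAt (cs.map PySem.Chars.upperChar) i whereTok = true
              · have hpa : pPred cs (cs.map PySem.Chars.upperChar) i = true := by
                  unfold pPred; rw [hst, h6]; simp [hs, hd]
                rw [if_pos h6, hpa]
                simp [hst]
              · have hpa : pPred cs (cs.map PySem.Chars.upperChar) i = false := by
                  unfold pPred
                  rw [hst, Bool.of_not_eq_true h6]
                  simp
                have hsb : applyEv (s, d, dep) (cs.getD i ' ') = (s, d, dep) := by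
                  unfold applyEv; dsimp only
                  rw [if_neg h1, if_neg h2, if_pos ⟨hs, hd⟩, if_neg h4, if_neg h5]
                rw [if_neg h6, hpa]
                exact ih (i+1) s d dep (by omega) (by rw [hstep, hsb])
        · rw [if_neg h3]
          have hpa : pPred cs (cs.map PySem.Chars.upperChar) i = false := by
            unfold pPred; rw [hst]
            cases s <;> cases d <;> simp_all
          have hsb : applyEv (s, d, dep) (cs.getD i ' ') = (s, d, dep) := by
            unfold applyEv; dsimp only
            rw [if_neg h1, if_neg h2, if_neg h3]
          rw [hpa]
          exact ih (i+1) s d dep (by omega) (by rw [hstep, hsb])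

lemma loopA2_eq (cs up : List Char) (ws : Nat) (wd : Int) :
    ∀ (m k : Nat) (s d : Bool) (dep : Int),
      cs.length - (ws + 7) - k = m → Gst cs ws k = (s, d, dep) →
      loopA2 cs up (ws + 7 + k) ws wd s d dep
        = (match (List.range' k m).find? (qPred cs up ws wd) with
          | none => ((ws : Int), (cs.length : Int))
          | some k' => ((ws : Int), ((ws + 7 + k' : Nat) : Int))) := by
  intro m
  induction m with
  | zero =>
    intro k s d dep hm hst
    have hj : ¬ ws + 7 + k < cs.length := by omega
    rw [loopA2]
    simp [hj]
  | succ m ih =>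
    intro k s d dep hm hst
    have hj : ws + 7 + k < cs.length := by omega
    have hstep : Gst cs ws (k+1) = applyEv (s, d, dep) (cs.getD (ws + 7 + k) ' ') := by
      rw [Gst_succ cs ws k hj, hst]
    have hsucc : ws + 7 + (k + 1) = ws + 7 + k + 1 := by omega
    rw [loopA2, List.range'_succ, List.find?_cons]
    simp only [dif_pos hj]
    by_cases h1 : cs.getD (ws + 7 + k) ' ' = '\'' ∧ d = false
    · have hq : qPred cs up ws wd k = false := by
        unfold qPred; rw [hst, h1.1]; simp [isSpec]
      have hsb : applyEv (s, d, dep) (cs.getD (ws + 7 + k) ' ') = (!s, d, dep) := by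
        unfold applyEv; dsimp only; rw [if_pos h1]
      rw [if_pos h1, hq, ← hsucc]
      exact ih (k+1) (!s) d dep (by omega) (by rw [hstep, hsb])
    · rw [if_neg h1]
      by_cases h2 : cs.getD (ws + 7 + k) ' ' = '"' ∧ s = false
      · have hq : qPred cs up ws wd k = false := by
          unfold qPred; rw [hst, h2.1]; simp [isSpec]
        have hsb : applyEv (s, d, dep) (cs.getD (ws + 7 + k) ' ') = (s, !d, dep) := by
          unfold applyEv; dsimp only; rw [if_neg h1, if_pos h2]
        rw [if_pos h2, hq, ← hsucc]
        exact ih (k+1) s (!d) dep (by omega) (by rw [hstep, hsb])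
      · rw [if_neg h2]
        by_cases h3 : s = false ∧ d = false
        · rw [if_pos h3]
          obtain ⟨hs, hd⟩ := h3
          by_cases h4 : cs.getD (ws + 7 + k) ' ' = '('
          · have hq : qPred cs up ws wd k = false := by
              unfold qPred; rw [hst, h4]; simp [isSpec]
            have hsb : applyEv (s, d, dep) (cs.getD (ws + 7 + k) ' ') = (s, d, dep + 1) := by
              unfold applyEv; dsimp only; rw [if_neg h1, if_neg h2, if_pos ⟨hs, hd⟩, if_pos h4]
            rw [if_pos h4, hq, ← hsucc]
            exact ih (k+1) s d (dep + 1) (by omega) (by rw [hstep, hsb])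
          · rw [if_neg h4]
            by_cases h5 : cs.getD (ws + 7 + k) ' ' = ')'
            · have hq : qPred cs up ws wd k = false := by
                unfold qPred; rw [hst, h5]; simp [isSpec]
              have hsb : applyEv (s, d, dep) (cs.getD (ws + 7 + k) ' ')
                  = (s, d, max 0 (dep - 1)) := by
                unfold applyEv; dsimp only
                rw [if_neg h1, if_neg h2, if_pos ⟨hs, hd⟩, if_neg h4, if_pos h5]
              rw [if_pos h5, hq, ← hsucc]
              exact ih (k+1) s d (max 0 (dep - 1)) (by omega) (by rw [hstep, hsb])
            · rw [if_neg h5]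
              have hc1 : cs.getD (ws + 7 + k) ' ' ≠ '\'' := fun h => h1 ⟨h, hd⟩
              have hc2 : cs.getD (ws + 7 + k) ' ' ≠ '"' := fun h => h2 ⟨h, hs⟩
              have hmem : isSpec (cs.getD (ws + 7 + k) ' ') = false := by
                simp only [isSpec, Bool.or_eq_false_iff, beq_eq_false_iff_ne, ne_eq]
                exact ⟨⟨⟨hc1, hc2⟩, h4⟩, h5⟩
              by_cases h7 : dep < wd
              · have hq : qPred cs up ws wd k = true := by
                  unfold qPred; rw [hst]; dsimp only
                  rw [hmem]
                  simp [hs, hd, h7]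
                rw [if_pos h7, hq]
              · rw [if_neg h7]
                rw [any_const_and]
                by_cases h8 : (decide (dep = wd)
                    && clauseMarkers.any (fun m => List.isPrefixOf m (up.drop (ws + 7 + k))))
                    = true
                · have hq : qPred cs up ws wd k = true := by
                    unfold qPred; rw [hst]; dsimp only
                    rw [hmem, h8]
                    simp [hs, hd]
                  rw [if_pos h8, hq]
                · have hq : qPred cs up ws wd k = false := by
                    unfold qPred; rw [hst]; dsimp only
                    rw [hmem, Bool.of_not_eq_true h8]
                    simp [h7]
                  have hsb : applyEv (s, d, dep) (cs.getD (ws + 7 + k) ' ') = (s, d, dep) := by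
                    unfold applyEv; dsimp only
                    rw [if_neg h1, if_neg h2, if_pos ⟨hs, hd⟩, if_neg h4, if_neg h5]
                  rw [if_neg h8, hq, ← hsucc]
                  exact ih (k+1) s d dep (by omega) (by rw [hstep, hsb])
        · rw [if_neg h3]
          have hq : qPred cs up ws wd k = false := by
            unfold qPred; rw [hst]
            cases s <;> cases d <;> simp_all
          have hsb : applyEv (s, d, dep) (cs.getD (ws + 7 + k) ' ') = (s, d, dep) := by
            unfold applyEv; dsimp only
            rw [if_neg h1, if_neg h2, if_neg h3]
          rw [hq, ← hsucc]
          exact ih (k+1) s d dep (by omega) (by rw [hstep, hsb])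

-- ===== B-side lemmas =====

-- characterization of the head of a filtered range'
lemma filter_range'_cons (p : Nat → Bool) :
    ∀ (m pos e : Nat) (rest : List Nat),
      (List.range' pos m).filter p = e :: rest →
      pos ≤ e ∧ e < pos + m ∧ p e = true ∧ (∀ i, pos ≤ i → i < e → p i = false) ∧
        rest = (List.range' (e+1) (pos + m - (e+1))).filter p := by
  intro m
  induction m with
  | zero => intro pos e rest h; simp at h
  | succ m ih =>
    intro pos e rest h
    rw [List.range'_succ, List.filter_cons] at h
    by_cases hp : p pos = true
    · rw [if_pos hp] at h
      obtain ⟨he, hrest⟩ := List.cons.inj h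
      subst he
      refine ⟨le_rfl, by omega, hp, by intro i h1 h2; omega, ?_⟩
      rw [show pos + (m + 1) - (pos + 1) = m from by omega]
      exact hrest.symm
    · rw [if_neg hp] at h
      obtain ⟨h1, h2, h3, h4, h5⟩ := ih (pos+1) e rest h
      refine ⟨by omega, by omega, h3, ?_, ?_⟩
      · intro i hi1 hi2
        rcases Nat.eq_or_lt_of_le hi1 with rfl | hlt
        · exact Bool.of_not_eq_true hp
        · exact h4 i hlt hi2
      · rw [h5, show pos + 1 + m - (e + 1) = pos + (m + 1) - (e + 1) from by omega]

lemma filter_range'_nil (p : Nat → Bool) :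
    ∀ (m pos : Nat), (List.range' pos m).filter p = [] →
      ∀ i, pos ≤ i → i < pos + m → p i = false := by
  intro m
  induction m with
  | zero => intro pos _ i h1 h2; omega
  | succ m ih =>
    intro pos h i h1 h2
    rw [List.range'_succ, List.filter_cons] at h
    by_cases hp : p pos = true
    · rw [if_pos hp] at h; simp at h
    · rw [if_neg hp] at h
      rcases Nat.eq_or_lt_of_le h1 with rfl | hlt
      · exact Bool.of_not_eq_true hp
      · exact ih (pos+1) h i hlt (by omega)

lemma Fst_gap (cs : List Char) (i j : Nat) (hij : i ≤ j)
    (hpl : ∀ t, i ≤ t → t < j → isSpec (cs.getD t ' ') = false) (hj : j ≤ cs.length) :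
    Fst cs j = Fst cs i := by
  obtain ⟨t, rfl⟩ : ∃ t, j = i + t := ⟨j - i, by omega⟩
  induction t with
  | zero => rfl
  | succ t iht =>
    rw [show i + (t+1) = (i+t) + 1 by omega, Fst_succ cs (i+t) (by omega),
      applyEv_plain _ _ (hpl (i+t) (by omega) (by omega)), iht (by omega) ?_ (by omega)
      ]
    intro u hu1 hu2
    exact hpl u hu1 (by omega)

lemma findFrom_spec (text pat : List Char) (k : Nat) (h : 0 ≤ findFrom text pat k) :
    k ≤ (findFrom text pat k).toNat ∧
    (text.drop (findFrom text pat k).toNat).take pat.length = pat ∧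
    (∀ i, k ≤ i → i < (findFrom text pat k).toNat → (text.drop i).take pat.length ≠ pat) := by
  fun_induction findFrom text pat k with
  | case1 k hlen hpre =>
    refine ⟨by simp, by simpa using hpre, ?_⟩
    intro i h1 h2
    simp at h2
    omega
  | case2 k hlen hpre ih =>
    obtain ⟨i1, i2, i3⟩ := ih h
    refine ⟨by omega, i2, ?_⟩
    intro i hi1 hi2
    rcases Nat.eq_or_lt_of_le hi1 with rfl | hlt
    · exact hpre
    · exact i3 i hlt hi2
  | case3 k hlen => omega

lemma findFrom_neg (text pat : List Char) (k : Nat) (hne : pat ≠ []) (h : findFrom text pat k = -1) :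
    ∀ i, k ≤ i → (text.drop i).take pat.length ≠ pat := by
  fun_induction findFrom text pat k with
  | case1 k hlen hpre => simp at h
  | case2 k hlen hpre ih =>
    intro i hi
    rcases Nat.eq_or_lt_of_le hi with rfl | hlt
    · exact hpre
    · exact ih h i hlt
  | case3 k hlen =>
    intro i hi hpre
    have hpos : 0 < pat.length := by
      cases pat with
      | nil => exact absurd rfl hne
      | cons a t => simp
    have hlen2 := congrArg List.length hpre
    rw [List.length_take, List.length_drop] at hlen2
    have h3 : pat.length ≤ text.length - i := min_eq_left_iff.mp hlen2
    omega

lemma find?_range'_eq_some (p : Nat → Bool) (lo m j : Nat) (h1 : lo ≤ j) (h2 : j < lo + m)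
    (hp : p j = true) (hmin : ∀ i, lo ≤ i → i < j → p i = false) :
    (List.range' lo m).find? p = some j := by
  obtain ⟨t, rfl⟩ : ∃ t, j = lo + t := ⟨j - lo, by omega⟩
  clear h1
  induction t generalizing lo m with
  | zero =>
    cases m with
    | zero => omega
    | succ m => rw [List.range'_succ, List.find?_cons, Nat.add_zero] at *; simp [hp]
  | succ t iht =>
    cases m with
    | zero => omega
    | succ m =>
      rw [List.range'_succ, List.find?_cons]
      rw [hmin lo le_rfl (by omega)]
      rw [show lo + (t+1) = (lo+1) + t by omega] at *
      exact iht (lo+1) m (by omega) hp (fun i a b => hmin i (by omega) b)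

lemma find?_range'_eq_none (p : Nat → Bool) (lo m : Nat)
    (h : ∀ i, lo ≤ i → i < lo + m → p i = false) :
    (List.range' lo m).find? p = none := by
  rw [List.find?_eq_none]
  intro x hx
  rw [List.mem_range'_1] at hx
  simp [h x hx.1 hx.2]

lemma find?_range'_split (p : Nat → Bool) (lo e m : Nat) (h1 : lo ≤ e) (h2 : e ≤ lo + m) :
    (List.range' lo m).find? p
      = ((List.range' lo (e - lo)).find? p).or ((List.range' e (lo + m - e)).find? p) := by
  have hsplit : List.range' lo m = List.range' lo (e - lo) ++ List.range' e (lo + m - e) := by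
    have h0 := @List.range'_append lo (e - lo) (lo + m - e) 1
    simp only [Nat.one_mul] at h0
    rw [show lo + (e - lo) = e from by omega,
      show e - lo + (lo + m - e) = m from by omega] at h0
    exact h0.symm
  rw [hsplit, List.find?_append]

lemma isTokenAt_slice (up : List Char) (i : Nat) (tok : List Char)
    (h : isTokenAt up i tok = true) : (up.drop i).take tok.length = tok := by
  unfold isTokenAt at h
  by_cases h1 : i + tok.length > up.length
  · simp [h1] at h
  · rw [if_neg h1] at h
    by_cases h2 : (up.drop i).take tok.length ≠ tok
    · rw [if_pos h2] at h; simp at h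
    · exact not_not.mp h2

lemma firstWhere_eq (up : List Char) (lo hi : Nat) :
    firstWhere up lo hi
      = (match (List.range' lo (hi - lo)).find? (fun i => isTokenAt up i whereTok) with
        | some w => (w : Int)
        | none => -1) := by
  fun_induction firstWhere up lo hi with
  | case1 lo k hk htok =>
    obtain ⟨hk0', hkhi'⟩ := hk
    have hk0 : 0 ≤ findFrom up whereTok lo := hk0'
    have hkhi : findFrom up whereTok lo < (hi : Int) := hkhi'
    obtain ⟨hge, hsl, hmin⟩ := findFrom_spec up whereTok lo hk0
    have hfind : (List.range' lo (hi - lo)).find? (fun i => isTokenAt up i whereTok)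
        = some (findFrom up whereTok lo).toNat := by
      apply find?_range'_eq_some _ _ _ _ hge (by omega) htok
      intro i hi1 hi2
      cases hti : isTokenAt up i whereTok with
      | false => rfl
      | true => exact absurd (isTokenAt_slice up i whereTok hti) (hmin i hi1 hi2)
    rw [hfind]
    show findFrom up whereTok lo = ((findFrom up whereTok lo).toNat : Int)
    rw [Int.toNat_of_nonneg hk0]
  | case2 lo k hk htok ih =>
    obtain ⟨hk0', hkhi'⟩ := hk
    have hk0 : 0 ≤ findFrom up whereTok lo := hk0'
    have hkhi : findFrom up whereTok lo < (hi : Int) := hkhi'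
    obtain ⟨hge, hsl, hmin⟩ := findFrom_spec up whereTok lo hk0
    have htok' : ¬ isTokenAt up (findFrom up whereTok lo).toNat whereTok = true := htok
    rw [ih]
    have hsplit := find?_range'_split (fun i => isTokenAt up i whereTok) lo
      ((findFrom up whereTok lo).toNat + 1) (hi - lo) (by omega) (by omega)
    have hnone : (List.range' lo ((findFrom up whereTok lo).toNat + 1 - lo)).find?
        (fun i => isTokenAt up i whereTok) = none := by
      apply find?_range'_eq_none
      intro i hi1 hi2
      by_cases hieq : i = (findFrom up whereTok lo).toNat
      · subst hieq; exact Bool.of_not_eq_true htok'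
      · cases hti : isTokenAt up i whereTok with
        | false => rfl
        | true => exact absurd (isTokenAt_slice up i whereTok hti) (hmin i hi1 (by omega))
    rw [show lo + (hi - lo) - ((findFrom up whereTok lo).toNat + 1)
        = hi - ((findFrom up whereTok lo).toNat + 1) from by omega] at hsplit
    rw [hsplit, hnone, Option.none_or]
  | case3 lo k hnk' =>
    have hnk : ¬(0 ≤ findFrom up whereTok lo ∧ findFrom up whereTok lo < (hi : Int)) := hnk'
    have hnone : (List.range' lo (hi - lo)).find? (fun i => isTokenAt up i whereTok)
        = none := by
      apply find?_range'_eq_none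
      intro i hi1 hi2
      cases hti : isTokenAt up i whereTok with
      | false => rfl
      | true =>
        exfalso
        have hslice := isTokenAt_slice up i whereTok hti
        rcases le_or_gt 0 (findFrom up whereTok lo) with h0 | h0
        · obtain ⟨hge, hsl, hmin⟩ := findFrom_spec up whereTok lo h0
          have hik : i < (findFrom up whereTok lo).toNat := by
            simp only [not_and, not_lt] at hnk
            have := hnk h0
            omega
          exact hmin i hi1 hik hslice
        · have hm1 : findFrom up whereTok lo = -1 := by
            rcases findFrom_ge up whereTok lo with h | h
            · exact h
            · omega
          exact findFrom_neg up whereTok lo (by decide) hm1 i (by omega) hslice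
    rw [hnone]

-- B's marker-hit minimum over a gap equals the first per-position marker match
lemma hits_min_eq (up : List Char) (pos e : Nat) :
    PySem.List.min? ((clauseMarkers.map (fun m => findFrom up m pos)).filter
        (fun k => decide (0 ≤ k) && decide (k < (e : Int)))) (fun x => x)
      = ((List.range' pos (e - pos)).find?
          (fun j => clauseMarkers.any (fun m => List.isPrefixOf m (up.drop j)))).map
          (fun j => (j : Int)) := by
  have hne : ∀ m ∈ clauseMarkers, m ≠ [] := by decide
  have hbridge : ∀ (m l : List Char), List.isPrefixOf m l = true ↔ l.take m.length = m := by
    intro m l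
    rw [List.isPrefixOf_iff_prefix, List.prefix_iff_eq_take]
    exact ⟨fun h => h.symm, fun h => h.symm⟩
  by_cases hex : ∃ j, j < e ∧ pos ≤ j ∧
      clauseMarkers.any (fun m => List.isPrefixOf m (up.drop j)) = true
  · set P : Nat → Bool := fun j => clauseMarkers.any (fun m => List.isPrefixOf m (up.drop j))
      with hP
    set j0 := Nat.find hex with hj0
    obtain ⟨hj0e, hj0pos, hj0P⟩ := Nat.find_spec hex
    have hleast : ∀ i, i < j0 → ¬(i < e ∧ pos ≤ i ∧ P i = true) := fun i h => Nat.find_min hex h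
    have hfind : (List.range' pos (e - pos)).find? P = some j0 := by
      apply find?_range'_eq_some P pos (e - pos) j0 hj0pos (by omega) hj0P
      intro i h1 h2
      cases hpi : P i with
      | false => rfl
      | true => exact absurd ⟨by omega, h1, hpi⟩ (hleast i h2)
    obtain ⟨m0, hm0mem, hm0pre⟩ := List.any_eq_true.mp hj0P
    have hsl0 : (up.drop j0).take m0.length = m0 := (hbridge m0 _).mp hm0pre
    have hr0 : 0 ≤ findFrom up m0 pos := by
      rcases findFrom_ge up m0 pos with h | h
      · exact absurd hsl0 (findFrom_neg up m0 pos (hne m0 hm0mem) h j0 hj0pos)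
      · omega
    obtain ⟨hrge, hrsl, hrmin⟩ := findFrom_spec up m0 pos hr0
    have hPr : P (findFrom up m0 pos).toNat = true := by
      rw [hP]
      exact List.any_eq_true.mpr ⟨m0, hm0mem, (hbridge m0 _).mpr hrsl⟩
    have hrle : (findFrom up m0 pos).toNat ≤ j0 := by
      by_contra hc
      exact hrmin j0 hj0pos (by omega) hsl0
    have hrge2 : j0 ≤ (findFrom up m0 pos).toNat := by
      by_contra hc
      exact hleast _ (by omega) ⟨by omega, hrge, hPr⟩
    have hreq : findFrom up m0 pos = (j0 : Int) := by omega
    have hmem0 : (j0 : Int) ∈ (clauseMarkers.map (fun m => findFrom up m pos)).filter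
        (fun k => decide (0 ≤ k) && decide (k < (e : Int))) := by
      rw [List.mem_filter]
      refine ⟨List.mem_map.mpr ⟨m0, hm0mem, hreq⟩, by simp; omega⟩
    have hlb : ∀ x ∈ (clauseMarkers.map (fun m => findFrom up m pos)).filter
        (fun k => decide (0 ≤ k) && decide (k < (e : Int))), (j0 : Int) ≤ x := by
      intro x hx
      rw [List.mem_filter] at hx
      obtain ⟨hx1, hx2⟩ := hx
      obtain ⟨m1, hm1mem, hm1eq⟩ := List.mem_map.mp hx1
      simp only [Bool.and_eq_true, decide_eq_true_eq] at hx2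
      obtain ⟨hx0, hxe⟩ := hx2
      rw [← hm1eq] at hx0 hxe ⊢
      obtain ⟨hxge, hxsl, -⟩ := findFrom_spec up m1 pos hx0
      have hPx : P (findFrom up m1 pos).toNat = true := by
        rw [hP]
        exact List.any_eq_true.mpr ⟨m1, hm1mem, (hbridge m1 _).mpr hxsl⟩
      have : j0 ≤ (findFrom up m1 pos).toNat := by
        by_contra hc
        exact hleast _ (by omega) ⟨by omega, hxge, hPx⟩
      omega
    rcases hmq : PySem.List.min? ((clauseMarkers.map (fun m => findFrom up m pos)).filter
        (fun k => decide (0 ≤ k) && decide (k < (e : Int)))) (fun x => x) with _ | v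
    · rw [PySem.List.min?_eq_none_iff] at hmq
      rw [hmq] at hmem0
      simp at hmem0
    · have hv1 := PySem.List.min?_mem hmq
      have hv2 := PySem.List.min?_isMin hmq
      have hvle : v ≤ (j0 : Int) := hv2 _ hmem0
      have hvge : (j0 : Int) ≤ v := hlb v hv1
      rw [hfind]
      simp [show v = (j0 : Int) from by omega]
  · have hfind : (List.range' pos (e - pos)).find?
        (fun j => clauseMarkers.any (fun m => List.isPrefixOf m (up.drop j))) = none := by
      apply find?_range'_eq_none
      intro i h1 h2
      cases hpi : clauseMarkers.any (fun m => List.isPrefixOf m (up.drop i)) with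
      | false => rfl
      | true => exact absurd ⟨i, by omega, h1, hpi⟩ hex
    have hnil : (clauseMarkers.map (fun m => findFrom up m pos)).filter
        (fun k => decide (0 ≤ k) && decide (k < (e : Int))) = [] := by
      rw [List.eq_nil_iff_forall_not_mem]
      intro x hx
      rw [List.mem_filter] at hx
      obtain ⟨hx1, hx2⟩ := hx
      obtain ⟨m1, hm1mem, hm1eq⟩ := List.mem_map.mp hx1
      simp only [Bool.and_eq_true, decide_eq_true_eq] at hx2
      obtain ⟨hx0, hxe⟩ := hx2
      rw [← hm1eq] at hx0 hxe
      obtain ⟨hxge, hxsl, -⟩ := findFrom_spec up m1 pos hx0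
      exact hex ⟨(findFrom up m1 pos).toNat, by omega, hxge,
        List.any_eq_true.mpr ⟨m1, hm1mem, (hbridge m1 _).mpr hxsl⟩⟩
    rw [hfind, hnil]
    rfl

lemma tok_false_of_spec (cs : List Char) (e : Nat) (he : e < cs.length)
    (hspec : isSpec (cs.getD e ' ') = true) :
    isTokenAt (cs.map PySem.Chars.upperChar) e whereTok = false := by
  simp only [isSpec, Bool.or_eq_true, beq_iff_eq] at hspec
  rcases hspec with ((h | h) | h) | h <;>
    exact tok_false_of_char cs e he _ h (by decide)

lemma find?_pPred_gap_unq (cs : List Char) (pos e : Nat) (hpe : pos ≤ e) (he : e ≤ cs.length)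
    (hgap : ∀ i, pos ≤ i → i < e → isSpec (cs.getD i ' ') = false)
    (hq : (Fst cs pos).1 = false ∧ (Fst cs pos).2.1 = false) :
    (List.range' pos (e - pos)).find? (pPred cs (cs.map PySem.Chars.upperChar))
      = (List.range' pos (e - pos)).find?
          (fun i => isTokenAt (cs.map PySem.Chars.upperChar) i whereTok) := by
  apply find?_congr
  intro i hi
  rw [List.mem_range'_1] at hi
  unfold pPred
  rw [Fst_gap cs pos i hi.1 (fun t h1 h2 => hgap t h1 (by omega)) (by omega)]
  simp [hq.1, hq.2]

lemma find?_pPred_gap_q (cs : List Char) (pos e : Nat) (hpe : pos ≤ e) (he : e ≤ cs.length)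
    (hgap : ∀ i, pos ≤ i → i < e → isSpec (cs.getD i ' ') = false)
    (hq : ¬((Fst cs pos).1 = false ∧ (Fst cs pos).2.1 = false)) :
    (List.range' pos (e - pos)).find? (pPred cs (cs.map PySem.Chars.upperChar)) = none := by
  apply find?_range'_eq_none
  intro i h1 h2
  unfold pPred
  rw [Fst_gap cs pos i h1 (fun t ht1 ht2 => hgap t ht1 (by omega)) (by omega)]
  rcases Bool.eq_false_or_eq_true (Fst cs pos).1 with hb | hb <;>
    rcases Bool.eq_false_or_eq_true (Fst cs pos).2.1 with hb2 | hb2 <;>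
      simp [hb, hb2] at hq ⊢

lemma phase1_eq (cs : List Char) :
    ∀ (evs : List Nat) (pos : Nat) (st : Bool × Bool × Int),
      evs = (List.range' pos (cs.length - pos)).filter (fun i => isSpec (cs.getD i ' ')) →
      pos ≤ cs.length → st = Fst cs pos →
      phase1 cs (cs.map PySem.Chars.upperChar) (evs ++ [cs.length]) st pos
        = ((List.range' pos (cs.length - pos)).find? (pPred cs (cs.map PySem.Chars.upperChar))).map
            (fun w => (w, Fst cs w)) := by
  intro evs
  induction evs with
  | nil =>
    intro pos st hevs hpos hst
    have hgap : ∀ i, pos ≤ i → i < cs.length → isSpec (cs.getD i ' ') = false := by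
      intro i h1 h2
      exact filter_range'_nil _ _ _ hevs.symm i h1 (by omega)
    simp only [List.nil_append, phase1]
    by_cases hsq : st.1 = false ∧ st.2.1 = false
    · simp only [if_pos hsq]
      rw [firstWhere_eq (cs.map PySem.Chars.upperChar) pos cs.length,
        find?_pPred_gap_unq cs pos cs.length hpos le_rfl hgap (by rw [← hst]; exact hsq)]
      cases hf : (List.range' pos (cs.length - pos)).find?
          (fun i => isTokenAt (cs.map PySem.Chars.upperChar) i whereTok) with
      | none => simp
      | some w =>
        have hw : pos ≤ w ∧ w < pos + (cs.length - pos) :=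
          List.mem_range'_1.mp (List.mem_of_find?_eq_some hf)
        have hFw : Fst cs w = Fst cs pos :=
          Fst_gap cs pos w hw.1 (fun t h1 h2 => hgap t h1 (by omega)) (by omega)
        simp [hst, hFw]
    · simp only [if_neg hsq]
      rw [find?_pPred_gap_q cs pos cs.length hpos le_rfl hgap (by rw [← hst]; exact hsq)]
      simp
  | cons e rest ih =>
    intro pos st hevs hpos hst
    obtain ⟨hpe, hen, hspec, hgap, hrest⟩ := filter_range'_cons _ _ _ _ _ hevs.symm
    have hen' : e < cs.length := by omega
    have hsplit := find?_range'_split (pPred cs (cs.map PySem.Chars.upperChar))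
      pos (e + 1) (cs.length - pos) (by omega) (by omega)
    rw [show pos + (cs.length - pos) - (e + 1) = cs.length - (e + 1) from by omega] at hsplit
    have hpe_false : pPred cs (cs.map PySem.Chars.upperChar) e = false := by
      unfold pPred
      rw [tok_false_of_spec cs e hen' hspec]
      simp
    have hsplit2 := find?_range'_split (pPred cs (cs.map PySem.Chars.upperChar))
      pos e (e + 1 - pos) (by omega) (by omega)
    rw [show pos + (e + 1 - pos) - e = 1 from by omega,
      show List.range' e 1 = [e] from by simp,
      show (([e] : List Nat).find? (pPred cs (cs.map PySem.Chars.upperChar)))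
        = none from by simp [List.find?, hpe_false]] at hsplit2
    rw [Option.or_none] at hsplit2
    have hFe : Fst cs e = Fst cs pos :=
      Fst_gap cs pos e hpe (fun t h1 h2 => hgap t h1 h2) (by omega)
    have hst' : applyEv st (cs.getD e ' ') = Fst cs (e + 1) := by
      rw [Fst_succ cs e hen', hFe, hst]
    have hrest' : rest = (List.range' (e + 1) (cs.length - (e + 1))).filter
        (fun i => isSpec (cs.getD i ' ')) := by
      rw [hrest]
      congr 1
      congr 1
      omega
    have hih := ih (e + 1) (applyEv st (cs.getD e ' ')) hrest' (by omega) hst'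
    simp only [List.cons_append, phase1]
    by_cases hsq : st.1 = false ∧ st.2.1 = false
    · simp only [if_pos hsq]
      rw [firstWhere_eq (cs.map PySem.Chars.upperChar) pos e]
      cases hf : (List.range' pos (e - pos)).find?
          (fun i => isTokenAt (cs.map PySem.Chars.upperChar) i whereTok) with
      | none =>
        have hnone : (List.range' pos (e + 1 - pos)).find?
            (pPred cs (cs.map PySem.Chars.upperChar)) = none := by
          rw [hsplit2,
            find?_pPred_gap_unq cs pos e hpe (by omega) hgap (by rw [← hst]; exact hsq), hf]
        simp only [hsplit, hnone, Option.none_or]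
        simp only [show ¬((0 : Int) ≤ -1) from by omega, if_false, if_pos hen']
        exact hih
      | some w =>
        have hw : pos ≤ w ∧ w < pos + (e - pos) :=
          List.mem_range'_1.mp (List.mem_of_find?_eq_some hf)
        have hFw : Fst cs w = Fst cs pos :=
          Fst_gap cs pos w hw.1 (fun t h1 h2 => hgap t h1 (by omega)) (by omega)
        have hsome : (List.range' pos (e + 1 - pos)).find?
            (pPred cs (cs.map PySem.Chars.upperChar)) = some w := by
          rw [hsplit2,
            find?_pPred_gap_unq cs pos e hpe (by omega) hgap (by rw [← hst]; exact hsq), hf]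
        simp only [hsplit, hsome, Option.some_or]
        simp [hst, hFw]
    · simp only [if_neg hsq]
      have hnone : (List.range' pos (e + 1 - pos)).find?
          (pPred cs (cs.map PySem.Chars.upperChar)) = none := by
        rw [hsplit2]
        exact find?_pPred_gap_q cs pos e hpe (by omega) hgap (by rw [← hst]; exact hsq)
      simp only [hsplit, hnone, Option.none_or]
      simp only [show ¬((0 : Int) ≤ -1) from by omega, if_false, if_pos hen']
      exact hih

lemma Gst_gap (cs : List Char) (ws : Nat) (a b : Nat) (hab : a ≤ b)
    (hb : ws + 7 + b ≤ cs.length)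
    (hpl : ∀ t, a ≤ t → t < b → isSpec (cs.getD (ws + 7 + t) ' ') = false) :
    Gst cs ws b = Gst cs ws a := by
  obtain ⟨u, rfl⟩ : ∃ u, b = a + u := ⟨b - a, by omega⟩
  induction u with
  | zero => rfl
  | succ u ihu =>
    rw [show a + (u + 1) = (a + u) + 1 from by omega, Gst_succ cs ws (a + u) (by omega),
      applyEv_plain _ _ (hpl (a + u) (by omega) (by omega)),
      ihu (by omega) (by omega) (fun t h1 h2 => hpl t h1 (by omega))]

lemma find?_range'_shift (p : Nat → Bool) (a : Nat) :
    ∀ (m b : Nat),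
      (List.range' (a + b) m).find? p
        = ((List.range' b m).find? (fun k => p (a + k))).map (fun k => a + k) := by
  intro m
  induction m with
  | zero => intro b; rfl
  | succ m ihm =>
    intro b
    rw [List.range'_succ, List.range'_succ, List.find?_cons, List.find?_cons]
    cases hp : p (a + b) with
    | true => simp
    | false =>
      rw [show a + b + 1 = a + (b + 1) from by omega]
      exact ihm (b + 1)

lemma phase2_eq (cs up : List Char) (ws : Nat) (wd : Int) :
    ∀ (evs : List Nat) (rel : Nat) (st : Bool × Bool × Int),
      evs = (List.range' (ws + 7 + rel) (cs.length - (ws + 7 + rel))).filter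
        (fun i => isSpec (cs.getD i ' ')) →
      st = Gst cs ws rel →
      phase2 cs up ws wd (evs ++ [cs.length]) st (ws + 7 + rel)
        = (match (List.range' rel (cs.length - (ws + 7) - rel)).find? (qPred cs up ws wd) with
          | none => ((ws : Int), (cs.length : Int))
          | some k' => ((ws : Int), ((ws + 7 + k' : Nat) : Int))) := by
  intro evs
  induction evs with
  | nil =>
    intro rel st hevs hst
    have hgap : ∀ i, ws + 7 + rel ≤ i → i < cs.length → isSpec (cs.getD i ' ') = false := by
      intro i h1 h2
      exact filter_range'_nil _ _ _ hevs.symm i h1 (by omega)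
    have hqe : ∀ k, rel ≤ k → k < cs.length - (ws + 7) →
        qPred cs up ws wd k = (
          if st.1 = false ∧ st.2.1 = false then
            if st.2.2 < wd then true
            else if st.2.2 = wd then
              clauseMarkers.any (fun m => List.isPrefixOf m (up.drop (ws + 7 + k)))
            else false
          else false) := by
      intro k h1 h2
      have hGk : Gst cs ws k = Gst cs ws rel :=
        Gst_gap cs ws rel k h1 (by omega) (fun t ht1 ht2 => hgap (ws + 7 + t) (by omega) (by omega))
      have hpl : isSpec (cs.getD (ws + 7 + k) ' ') = false := hgap (ws + 7 + k) (by omega) (by omega)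
      have hpl' : isSpec (cs[ws + 7 + k]?.getD ' ') = false := by
        simpa [List.getD] using hpl
      unfold qPred
      rw [hGk, ← hst]
      rcases Bool.eq_false_or_eq_true st.1 with hb1 | hb1 <;>
        rcases Bool.eq_false_or_eq_true st.2.1 with hb2 | hb2 <;>
          by_cases hlt : st.2.2 < wd <;> by_cases heq : st.2.2 = wd <;>
            simp [hb1, hb2, hlt, heq, hpl']
    simp only [List.nil_append, phase2]
    by_cases hsq : st.1 = false ∧ st.2.1 = false
    · by_cases hlt : st.2.2 < wd
      · simp only [if_pos hsq, if_pos hlt]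
        by_cases hpe : ws + 7 + rel < cs.length
        · simp only [if_pos hpe]
          have hfind : (List.range' rel (cs.length - (ws + 7) - rel)).find?
              (qPred cs up ws wd) = some rel := by
            apply find?_range'_eq_some _ _ _ _ le_rfl (by omega)
            · rw [hqe rel le_rfl (by omega), if_pos hsq, if_pos hlt]
            · intro i h1 h2; omega
          simp [hfind]
        · simp only [if_neg hpe]
          have hm0 : cs.length - (ws + 7) - rel = 0 := by omega
          rw [hm0]
          simp
      · by_cases heq : st.2.2 = wd
        · simp only [if_pos hsq, if_neg hlt, if_pos heq]
          rw [hits_min_eq up (ws + 7 + rel) cs.length]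
          rw [show (cs.length : Nat) - (ws + 7 + rel) = cs.length - (ws + 7) - rel from by omega,
            find?_range'_shift _ (ws + 7) (cs.length - (ws + 7) - rel) rel]
          have hcongr : (List.range' rel (cs.length - (ws + 7) - rel)).find?
                (fun k => clauseMarkers.any (fun m => List.isPrefixOf m (up.drop (ws + 7 + k))))
              = (List.range' rel (cs.length - (ws + 7) - rel)).find? (qPred cs up ws wd) := by
            apply find?_congr
            intro k hk
            rw [List.mem_range'_1] at hk
            rw [hqe k hk.1 (by omega), if_pos hsq, if_neg hlt, if_pos heq]
          rw [hcongr]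
          cases hf : (List.range' rel (cs.length - (ws + 7) - rel)).find?
              (qPred cs up ws wd) with
          | none => simp
          | some k' => simp
        · simp only [if_pos hsq, if_neg hlt, if_neg heq]
          have hfind : (List.range' rel (cs.length - (ws + 7) - rel)).find?
              (qPred cs up ws wd) = none := by
            apply find?_range'_eq_none
            intro i h1 h2
            rw [hqe i h1 (by omega), if_pos hsq, if_neg hlt, if_neg heq]
          simp [hfind]
    · simp only [if_neg hsq]
      have hfind : (List.range' rel (cs.length - (ws + 7) - rel)).find?
          (qPred cs up ws wd) = none := by
        apply find?_range'_eq_none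
        intro i h1 h2
        rw [hqe i h1 (by omega), if_neg hsq]
      simp [hfind]
  | cons e rest ih =>
    intro rel st hevs hst
    obtain ⟨hpe, hen, hspec, hgap, hrest⟩ := filter_range'_cons _ _ _ _ _ hevs.symm
    have hen' : e < cs.length := by omega
    set ke := e - (ws + 7) with hke
    have heabs : e = ws + 7 + ke := by omega
    have hqe : ∀ k, rel ≤ k → k < ke →
        qPred cs up ws wd k = (
          if st.1 = false ∧ st.2.1 = false then
            if st.2.2 < wd then true
            else if st.2.2 = wd then
              clauseMarkers.any (fun m => List.isPrefixOf m (up.drop (ws + 7 + k)))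
            else false
          else false) := by
      intro k h1 h2
      have hGk : Gst cs ws k = Gst cs ws rel :=
        Gst_gap cs ws rel k h1 (by omega) (fun t ht1 ht2 => hgap (ws + 7 + t) (by omega) (by omega))
      have hpl : isSpec (cs.getD (ws + 7 + k) ' ') = false := hgap (ws + 7 + k) (by omega) (by omega)
      have hpl' : isSpec (cs[ws + 7 + k]?.getD ' ') = false := by
        simpa [List.getD] using hpl
      unfold qPred
      rw [hGk, ← hst]
      rcases Bool.eq_false_or_eq_true st.1 with hb1 | hb1 <;>
        rcases Bool.eq_false_or_eq_true st.2.1 with hb2 | hb2 <;>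
          by_cases hlt : st.2.2 < wd <;> by_cases heq : st.2.2 = wd <;>
            simp [hb1, hb2, hlt, heq, hpl']
    have hqke : qPred cs up ws wd ke = false := by
      unfold qPred
      simp only [← heabs, hspec]
      simp
    have hsplit := find?_range'_split (qPred cs up ws wd) rel (ke + 1)
      (cs.length - (ws + 7) - rel) (by omega) (by omega)
    rw [show rel + (cs.length - (ws + 7) - rel) - (ke + 1)
        = cs.length - (ws + 7) - (ke + 1) from by omega] at hsplit
    have hsplit2 := find?_range'_split (qPred cs up ws wd) rel ke (ke + 1 - rel)
      (by omega) (by omega)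
    rw [show rel + (ke + 1 - rel) - ke = 1 from by omega,
      show List.range' ke 1 = [ke] from by simp,
      show (([ke] : List Nat).find? (qPred cs up ws wd)) = none from by
        simp [List.find?, hqke]] at hsplit2
    rw [Option.or_none] at hsplit2
    have hGe : Gst cs ws ke = Gst cs ws rel :=
      Gst_gap cs ws rel ke (by omega) (by omega)
        (fun t h1 h2 => hgap (ws + 7 + t) (by omega) (by omega))
    have hst' : applyEv st (cs.getD e ' ') = Gst cs ws (ke + 1) := by
      rw [Gst_succ cs ws ke (by omega), hGe, ← hst, heabs]
    have hrest' : rest = (List.range' (ws + 7 + (ke + 1)) (cs.length - (ws + 7 + (ke + 1)))).filter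
        (fun i => isSpec (cs.getD i ' ')) := by
      rw [hrest]
      have h1 : e + 1 = ws + 7 + (ke + 1) := by omega
      have h2 : ws + 7 + rel + (cs.length - (ws + 7 + rel)) - (ws + 7 + (ke + 1))
          = cs.length - (ws + 7 + (ke + 1)) := by omega
      rw [h1, h2]
    have hih := ih (ke + 1) (applyEv st (cs.getD e ' ')) hrest' hst'
    have hproceed : phase2 cs up ws wd (rest ++ [cs.length]) (applyEv st (cs.getD e ' ')) (e + 1)
        = (match (List.range' (ke + 1) (cs.length - (ws + 7) - (ke + 1))).find?
            (qPred cs up ws wd) with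
          | none => ((ws : Int), (cs.length : Int))
          | some k' => ((ws : Int), ((ws + 7 + k' : Nat) : Int))) := by
      rw [show e + 1 = ws + 7 + (ke + 1) from by omega]
      exact hih
    simp only [List.cons_append, phase2]
    by_cases hsq : st.1 = false ∧ st.2.1 = false
    · by_cases hlt : st.2.2 < wd
      · simp only [if_pos hsq, if_pos hlt]
        by_cases hpos : ws + 7 + rel < e
        · simp only [if_pos hpos]
          have hfind : (List.range' rel (cs.length - (ws + 7) - rel)).find?
              (qPred cs up ws wd) = some rel := by
            apply find?_range'_eq_some _ _ _ _ le_rfl (by omega)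
            · rw [hqe rel le_rfl (by omega), if_pos hsq, if_pos hlt]
            · intro i h1 h2; omega
          simp [hfind]
        · simp only [if_neg hpos]
          have hnone : (List.range' rel (ke + 1 - rel)).find? (qPred cs up ws wd) = none := by
            rw [hsplit2]
            apply find?_range'_eq_none
            intro i h1 h2
            have hik : i = ke := by omega
            rw [hik]
            exact hqke
          rw [hsplit, hnone, Option.none_or, if_pos hen']
          exact hproceed
      · by_cases heq : st.2.2 = wd
        · simp only [if_pos hsq, if_neg hlt, if_pos heq]
          rw [hits_min_eq up (ws + 7 + rel) e]
          rw [show (e : Nat) - (ws + 7 + rel) = ke - rel from by omega,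
            find?_range'_shift _ (ws + 7) (ke - rel) rel]
          have hcongr : (List.range' rel (ke - rel)).find?
                (fun k => clauseMarkers.any (fun m => List.isPrefixOf m (up.drop (ws + 7 + k))))
              = (List.range' rel (ke - rel)).find? (qPred cs up ws wd) := by
            apply find?_congr
            intro k hk
            rw [List.mem_range'_1] at hk
            rw [hqe k hk.1 (by omega), if_pos hsq, if_neg hlt, if_pos heq]
          rw [hcongr]
          cases hf : (List.range' rel (ke - rel)).find? (qPred cs up ws wd) with
          | none =>
            have hnone2 : (List.range' rel (ke + 1 - rel)).find? (qPred cs up ws wd) = none := by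
              rw [hsplit2, hf]
            rw [hsplit, hnone2, Option.none_or, if_pos hen']
            simp only [Option.map_none]
            exact hproceed
          | some k' =>
            have hsome2 : (List.range' rel (ke + 1 - rel)).find? (qPred cs up ws wd)
                = some k' := by
              rw [hsplit2, hf]
            rw [hsplit, hsome2, Option.some_or]
            simp
        · simp only [if_pos hsq, if_neg hlt, if_neg heq]
          have hnone : (List.range' rel (ke + 1 - rel)).find? (qPred cs up ws wd) = none := by
            rw [hsplit2]
            apply find?_range'_eq_none
            intro i h1 h2
            rw [hqe i h1 (by omega), if_pos hsq, if_neg hlt, if_neg heq]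
          rw [hsplit, hnone, Option.none_or, if_pos hen']
          exact hproceed
    · simp only [if_neg hsq]
      have hnone : (List.range' rel (ke + 1 - rel)).find? (qPred cs up ws wd) = none := by
        rw [hsplit2]
        apply find?_range'_eq_none
        intro i h1 h2
        rw [hqe i h1 (by omega), if_neg hsq]
      rw [hsplit, hnone, Option.none_or, if_pos hen']
      exact hproceed

lemma range'_split_at (lo e m : Nat) (h1 : lo ≤ e) (h2 : e ≤ lo + m) :
    List.range' lo m = List.range' lo (e - lo) ++ List.range' e (lo + m - e) := by
  have h0 := @List.range'_append lo (e - lo) (lo + m - e) 1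
  simp only [Nat.one_mul] at h0
  rw [show lo + (e - lo) = e from by omega,
    show e - lo + (lo + m - e) = m from by omega] at h0
  exact h0.symm

lemma filter_le_range'_zero (a n : Nat) :
    (List.range' 0 n).filter (fun x => decide (a ≤ x)) = List.range' a (n - a) := by
  by_cases h : a ≤ n
  · rw [range'_split_at 0 a n (by omega) (by omega), List.filter_append]
    simp only [Nat.sub_zero, Nat.zero_add]
    rw [List.filter_eq_nil_iff.mpr ?_, List.filter_eq_self.mpr ?_, List.nil_append]
    · intro x hx
      rw [List.mem_range'_1] at hx
      simp
      omega
    · intro x hx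
      rw [List.mem_range'_1] at hx
      simp
      omega
  · rw [show n - a = 0 from by omega]
    rw [List.filter_eq_nil_iff.mpr ?_]
    · rfl
    · intro x hx
      rw [List.mem_range'_1] at hx
      simp
      omega

-- ===== VERDICT (by name: the statement is the Claim_ definition above) =====
theorem find_where_range_py_spec : Claim_equal_find_where_range_py := by
  intro statement _hd
  unfold Spec_find_where_range_py
  simp only [find_where_range_py, find_where_range_py_alt]
  have hup : (PySem.Str.upper statement).toList
      = statement.toList.map PySem.Chars.upperChar := by
    simp [PySem.Str.toList_upper]
    rfl
  rw [hup]
  set cs := statement.toList with hcs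
  have hev : eventsOf cs = (List.range' 0 (cs.length - 0)).filter
      (fun i => isSpec (cs.getD i ' ')) := by
    unfold eventsOf
    rw [List.range_eq_range', Nat.sub_zero]
  rw [loopA1_eq cs cs.length 0 false false 0 (by omega) rfl,
    phase1_eq cs (eventsOf cs) 0 (false, false, 0) hev (by omega) rfl]
  simp only [Nat.sub_zero]
  cases hfind : (List.range' 0 cs.length).find? (pPred cs (cs.map PySem.Chars.upperChar)) with
  | none => rfl
  | some w =>
    simp only [Option.map_some]
    rcases hFst : Fst cs w with ⟨s, d, dep⟩
    have hL2 := loopA2_eq cs (cs.map PySem.Chars.upperChar) w dep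
      (cs.length - (w + 7)) 0 s d dep (by omega) (by unfold Gst; simpa using hFst)
    simp only [Nat.add_zero] at hL2
    have hevs2 : (eventsOf cs).filter (fun x => w + 7 ≤ x)
        = (List.range' (w + 7 + 0) (cs.length - (w + 7 + 0))).filter
            (fun i => isSpec (cs.getD i ' ')) := by
      rw [hev, Nat.sub_zero, Nat.add_zero, List.filter_comm, filter_le_range'_zero]
    have hP2 := phase2_eq cs (cs.map PySem.Chars.upperChar) w dep
      ((eventsOf cs).filter (fun x => w + 7 ≤ x)) 0 (s, d, dep) hevs2
      (by unfold Gst; simpa using hFst.symm)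
    simp only [Nat.add_zero, Nat.sub_zero] at hP2
    rw [hL2, hP2]
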